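-- pv_equiv track=rewrite | github.com/olsenw/LeetCodeExercises | Python3/apply_operations_to_maximize_score.py | maximumScore_leet
-- ===== SOURCE A (Python) =====
-- import heapq
-- import math
-- from typing import List, Dict, Set, Optional
--
-- def maximumScore_leet(nums: List[int], k: int) -> int:
--     mod = 10**9 + 7
--     n = len(nums)
--     primeScores = [0] * n
--     for i in range(n):
--         num = nums[i]
--         # try all factors in range [2, sqrt(num)]
--         for factor in range(2, int(math.sqrt(num))+1):
--             if num % factor == 0:
--                 primeScores[i] += 1
--                 while num % factor == 0:
--                     num //= factor
--         # num must be prime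
--         if num >= 2:
--             primeScores[i] += 1
--     nextDominant = [n] * n
--     lastDominant = [-1] * n
--     # decreasing monotonic stack
--     stack = []
--     for i in range(n):
--         while stack and primeScores[stack[-1]] < primeScores[i]:
--             nextDominant[stack.pop()] = i
--         if stack:
--             lastDominant[i] = stack[-1]
--         stack.append(i)
--     subarrays = [(nextDominant[i] - i) * (i - lastDominant[i]) for i in range(n)]
--     queue = [(-j,i) for i,j in enumerate(nums)]
--     heapq.heapify(queue)
--     def modularExponentiation(base, exponent):
--         answer = 1
--         while exponent > 0:
--             if exponent % 2:
--                 answer = (answer * base) % mod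
--             base = (base * base) % mod
--             exponent //= 2
--         return answer
--     answer = 1
--     while k > 0:
--         num, i = heapq.heappop(queue)
--         num *= -1
--         operations = min(k, subarrays[i])
--         answer = (answer * modularExponentiation(num, operations)) % mod
--         k -= operations
--     return answer
-- ===== SOURCE B (Python) =====
-- import math
-- from typing import List
--
-- def maximumScore_leet(nums: List[int], k: int) -> int:
--     mod = 10**9 + 7
--     n = len(nums)
--     primeScores = [0] * n
--     for i in range(n):
--         num = nums[i]
--         for factor in range(2, int(math.sqrt(num)) + 1):
--             if num % factor == 0:
--                 primeScores[i] += 1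
--                 while num % factor == 0:
--                     num //= factor
--         if num >= 2:
--             primeScores[i] += 1
--     # dominance ranges by pointer JUMPING (no stack): nxt[i] = first j > i with a
--     # strictly larger prime score (else n); prv[i] = last j < i with >= score (else -1)
--     nxt = [n] * n
--     for i in range(n - 1, -1, -1):
--         j = i + 1
--         while j < n and primeScores[j] <= primeScores[i]:
--             j = nxt[j]
--         nxt[i] = j
--     prv = [-1] * n
--     for i in range(n):
--         j = i - 1
--         while j >= 0 and primeScores[j] < primeScores[i]:
--             j = prv[j]
--         prv[i] = j
--     answer = 1
--     for _, i in sorted((-v, idx) for idx, v in enumerate(nums)):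
--         if k <= 0:
--             break
--         operations = min(k, (nxt[i] - i) * (i - prv[i]))
--         answer = answer * pow(nums[i], operations, mod) % mod
--         k -= operations
--     return answer
-- ===== Notes on version B (the rewrite author's own statement) =====
-- stated objective: alternative
-- what changed: The monotonic stack and its nextDominant/lastDominant bookkeeping are replaced by two stackless pointer-jumping passes (nxt[i] found by hopping j = nxt[j] from i+1, prv[i] by hopping j = prv[j] from i-1), and the heap with hand-written modular exponentiation is replaced by one sort of (-value, index) pairs with the built-in three-argument pow.
import Mathlib
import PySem

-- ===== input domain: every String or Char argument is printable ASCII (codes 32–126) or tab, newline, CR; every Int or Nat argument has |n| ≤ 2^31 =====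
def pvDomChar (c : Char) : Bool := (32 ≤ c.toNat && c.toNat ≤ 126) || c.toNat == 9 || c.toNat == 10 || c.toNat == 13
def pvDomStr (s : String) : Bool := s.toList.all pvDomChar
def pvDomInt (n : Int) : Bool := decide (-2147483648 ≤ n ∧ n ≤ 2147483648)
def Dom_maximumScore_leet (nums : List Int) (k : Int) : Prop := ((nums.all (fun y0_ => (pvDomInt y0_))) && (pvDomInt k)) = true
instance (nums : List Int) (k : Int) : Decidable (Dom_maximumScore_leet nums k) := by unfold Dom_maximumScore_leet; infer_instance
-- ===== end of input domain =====

-- B replaces the monotonic stack by two stackless pointer-jumping passes for the dominance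
-- ranges, and the heap + hand-written modular exponentiation by one sort of (-value, index)
-- pairs with built-in pow; return values proved equal on Pre_ (nonnegative values,
-- 2*k ≤ n*(n+1), i.e. exactly where A returns without raising).


-- ===== PORT A =====

def pvMod : Int := 1000000007

-- int(math.sqrt(num)): exact for 0 ≤ num ≤ 2^31 (the Dom bound): the double sqrt of such an
-- integer rounds to a value whose int() is the integer square root (negative num: ValueError,
-- excluded by Pre_).
def pvSqrtInt (num : Int) : Int := (Nat.sqrt num.toNat : Int)

-- 'while num % factor == 0: num //= factor'.  The extra guards 2 ≤ f and 1 ≤ num only make the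
-- recursion total; every call the ports make has 2 ≤ f and 1 ≤ num, where they do not fire.
def pvReduce (num f : Int) : Int :=
  if _h : 2 ≤ f ∧ 1 ≤ num ∧ PySem.Int.mod num f = 0 then pvReduce (PySem.Int.floordiv num f) f
  else num
termination_by num.toNat
decreasing_by
  have hf : 0 < f := by omega
  have : PySem.Int.floordiv num f = num / f := PySem.Int.floordiv_eq_ediv_of_pos hf
  rw [this]
  have h1 : num / f < num := by
    apply Int.ediv_lt_of_lt_mul (by omega)
    nlinarith
  omega

-- the primeScores[i] computation — the same lines appear verbatim in Source A and Source B, so both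
-- ports share this transliteration
def pvPrimeScore (num0 : Int) : Int :=
  let st := (PySem.List.pyRange 2 (pvSqrtInt num0 + 1) 1).foldl
    (fun (s : Int × Int) f =>
      if PySem.Int.mod s.2 f = 0 then (s.1 + 1, pvReduce s.2 f) else s)
    (0, num0)
  if 2 ≤ st.2 then st.1 + 1 else st.1

-- 'while stack and primeScores[stack[-1]] < primeScores[i]: nextDominant[stack.pop()] = i'
-- (stack kept head-first: head = Python's stack[-1])
def pvPopA (ps : List Int) (i : Int) : List Int → List Int → List Int × List Int
  | next, [] => (next, [])
  | next, j :: rest =>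
    if PySem.List.pyGetD ps j 0 < PySem.List.pyGetD ps i 0 then
      pvPopA ps i (PySem.List.pySetD next j i) rest
    else (next, j :: rest)

-- one iteration of A's monotonic-stack loop: state ((nextDominant, lastDominant), stack)
def pvStepA (ps : List Int) (s : (List Int × List Int) × List Int) (i : Int) :
    (List Int × List Int) × List Int :=
  let r := pvPopA ps i s.1.1 s.2
  ((r.1, match r.2 with
         | [] => s.1.2
         | t :: _ => PySem.List.pySetD s.1.2 i t), i :: r.2)

-- A's modularExponentiation loop (answer accumulator; order of updates as in the Python)
def pvModExpGo (base exponent answer : Int) : Int :=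
  if _h : 0 < exponent then
    pvModExpGo (PySem.Int.mod (base * base) pvMod) (PySem.Int.floordiv exponent 2)
      (if PySem.Int.mod exponent 2 ≠ 0 then PySem.Int.mod (answer * base) pvMod else answer)
  else answer
termination_by exponent.toNat
decreasing_by
  have : PySem.Int.floordiv exponent 2 = exponent / 2 := PySem.Int.floordiv_eq_ediv_of_pos (by omega)
  rw [this]
  have h1 : exponent / 2 < exponent := by
    apply Int.ediv_lt_of_lt_mul (by omega)
    nlinarith
  omega

def pvModExpA (base exponent : Int) : Int := pvModExpGo base exponent 1

-- 'while k > 0: num, i = heappop(queue); …'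
def pvGreedyA (subs : List Int) : List (Int × Int) → Int → Int → Int
  | queue, k, answer =>
    if 0 < k then
      match queue with
      | [] => answer   -- Python: heappop of the empty heap raises IndexError (outside Pre_)
      | (negnum, i) :: rest =>
        let num := -negnum
        let operations := min k (PySem.List.pyGetD subs i 0)
        pvGreedyA subs rest (k - operations)
          (PySem.Int.mod (answer * pvModExpA num operations) pvMod)
    else answer

def maximumScore_leet (nums : List Int) (k : Int) : Int :=
  let n : Int := PySem.List.len nums
  let primeScores := (PySem.List.pyRange 0 n 1).map
    (fun i => pvPrimeScore (PySem.List.pyGetD nums i 0))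
  let st := (PySem.List.pyRange 0 n 1).foldl (pvStepA primeScores)
    ((List.replicate n.toNat n, List.replicate n.toNat (-1)), [])
  let subarrays := (PySem.List.pyRange 0 n 1).map
    (fun i => (PySem.List.pyGetD st.1.1 i 0 - i) * (i - PySem.List.pyGetD st.1.2 i 0))
  -- heapq.heapify + repeated heappop modeled as the sorted pair list popped from the front:
  -- exact, since the pairs (-nums[i], i) are pairwise distinct and repeated heappop returns
  -- the ascending order of the heap's contents
  let queue := PySem.List.sorted2 ((PySem.List.enumerate nums).map (fun p => (-p.2, p.1)))
    Prod.fst Prod.snd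
  pvGreedyA subarrays queue k 1

-- ===== PORT B =====

-- B's nxt scan: 'j = i + 1; while j < n and primeScores[j] <= primeScores[i]: j = nxt[j]'
-- (the Nat fuel only makes the recursion structural: it is called with fuel = n - j, and the
-- Python loop's j grows by at least 1 per round and stops at n, so the fuel never runs out)
def pvJumpNxt (ps nxt : List Int) (n gi : Int) : Nat → Int → Int
  | 0, j => j
  | fuel + 1, j =>
    if j < n ∧ PySem.List.pyGetD ps j 0 ≤ gi then
      pvJumpNxt ps nxt n gi fuel (max (PySem.List.pyGetD nxt j 0) (j + 1))
    else j

-- B's prv scan: 'j = i - 1; while j >= 0 and primeScores[j] < primeScores[i]: j = prv[j]'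
-- (fuel = j + 1 for the same reason; 'max'/'min' never change the value the Python reads)
def pvJumpPrv (ps prv : List Int) (gi : Int) : Nat → Int → Int
  | 0, j => j
  | fuel + 1, j =>
    if 0 ≤ j ∧ PySem.List.pyGetD ps j 0 < gi then
      pvJumpPrv ps prv gi fuel (min (PySem.List.pyGetD prv j 0) (j - 1))
    else j

-- one iteration of B's greedy loop over the sorted pairs: state (answer, k); 'break' when
-- k ≤ 0 is the fold that leaves the state unchanged from then on
def pvGreedyStepB (nums nxt prv : List Int) (s : Int × Int) (p : Int × Int) : Int × Int :=
  if s.2 ≤ 0 then s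
  else
    let operations := min s.2
      ((PySem.List.pyGetD nxt p.2 0 - p.2) * (p.2 - PySem.List.pyGetD prv p.2 0))
    (PySem.Int.mod
      (s.1 * PySem.Int.powMod (PySem.List.pyGetD nums p.2 0) operations.toNat pvMod) pvMod,
     s.2 - operations)

def maximumScore_leet_alt (nums : List Int) (k : Int) : Int :=
  let n : Int := PySem.List.len nums
  let primeScores := (PySem.List.pyRange 0 n 1).map
    (fun i => pvPrimeScore (PySem.List.pyGetD nums i 0))
  let nxt := (PySem.List.pyRange (n - 1) (-1) (-1)).foldl
    (fun a i => PySem.List.pySetD a i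
      (pvJumpNxt primeScores a n (PySem.List.pyGetD primeScores i 0) (n - (i + 1)).toNat (i + 1)))
    (List.replicate n.toNat n)
  let prv := (PySem.List.pyRange 0 n 1).foldl
    (fun a i => PySem.List.pySetD a i
      (pvJumpPrv primeScores a (PySem.List.pyGetD primeScores i 0) i.toNat (i - 1)))
    (List.replicate n.toNat (-1))
  let order := PySem.List.sorted2 ((PySem.List.enumerate nums).map (fun p => (-p.2, p.1)))
    Prod.fst Prod.snd
  (order.foldl (pvGreedyStepB nums nxt prv) (1, k)).1

-- ===== PRECONDITION & SPEC =====

-- Pre_ excludes exactly the inputs on which A raises: a negative value (math.sqrt raises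
-- ValueError there) or 2*k > n*(n+1) (the dominance counts always sum to n*(n+1)/2, so A's
-- heap is then exhausted with k still positive and heappop raises IndexError).
def Pre_maximumScore_leet (nums : List Int) (k : Int) : Prop :=
  (∀ x ∈ nums, 0 ≤ x) ∧ 2 * k ≤ PySem.List.len nums * (PySem.List.len nums + 1)
instance (nums : List Int) (k : Int) : Decidable (Pre_maximumScore_leet nums k) := by
  unfold Pre_maximumScore_leet; infer_instance

def pvWitness_maximumScore_leet : List Int × Int := ([2, 3, 9], 2)

def Spec_maximumScore_leet (nums : List Int) (k : Int) (out : Int) : Prop :=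
  out = maximumScore_leet_alt nums k
instance (nums : List Int) (k : Int) (out : Int) : Decidable (Spec_maximumScore_leet nums k out) := by
  unfold Spec_maximumScore_leet; infer_instance

-- ===== CLAIM (what is proved, stated in full; the proofs are below) =====
def Claim_equal_maximumScore_leet : Prop := ∀ (nums : List Int) (k : Int), Dom_maximumScore_leet nums k → Pre_maximumScore_leet nums k → Spec_maximumScore_leet nums k (maximumScore_leet nums k)


-- ===== LEMMAS AND PROOFS =====

-- ---------- generic helpers ----------

-- index update/read in Int form (all indices the ports read are nonnegative)
theorem pv_gset (xs : List Int) (a b v : Int) (ha0 : 0 ≤ a) (hb0 : 0 ≤ b)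
    (ha : a < (xs.length : Int)) :
    PySem.List.pyGetD (PySem.List.pySetD xs a v) b 0 =
      if b = a then v else PySem.List.pyGetD xs b 0 := by
  have h1 : a = ((a.toNat : Nat) : Int) := by omega
  have h2 : b = ((b.toNat : Nat) : Int) := by omega
  rw [h1, h2, PySem.List.pyGetD_pySetD_natCast xs a.toNat b.toNat v 0 (by omega)]
  by_cases h : b.toNat = a.toNat
  · rw [if_pos h, if_pos (by omega)]
  · rw [if_neg h, if_neg (by omega)]

theorem pv_get_replicate (N : Nat) (v : Int) (m : Int) (h0 : 0 ≤ m) (h1 : m < (N : Int)) :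
    PySem.List.pyGetD (List.replicate N v) m 0 = v := by
  have hm : m = ((m.toNat : Nat) : Int) := by omega
  have hm2 : m.toNat < N := by omega
  rw [hm, PySem.List.pyGetD_natCast]
  simp [List.getD, hm2]

-- a greatest element of an initial segment of ℤ satisfying P
theorem pv_exists_max (P : Int → Prop) :
    ∀ (i : Nat), (∃ m : Int, 0 ≤ m ∧ m < (i : Int) ∧ P m) →
      ∃ mx : Int, 0 ≤ mx ∧ mx < (i : Int) ∧ P mx ∧
        ∀ m', mx < m' → m' < (i : Int) → ¬ P m' := by
  intro i
  induction i with
  | zero => rintro ⟨m, h0, h1, _⟩; exact absurd h1 (by omega)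
  | succ i ih =>
    rintro ⟨m, h0, h1, hP⟩
    by_cases hPi : P (i : Int)
    · exact ⟨(i : Int), by omega, by omega, hPi, fun m' ha hb => ((by omega : False)).elim⟩
    · have hmi : m ≠ (i : Int) := fun h => hPi (h ▸ hP)
      obtain ⟨mx, a, b, c, d⟩ := ih ⟨m, h0, by omega, hP⟩
      refine ⟨mx, a, by omega, c, fun m' h1' h2' => ?_⟩
      by_cases hm' : m' = (i : Int)
      · exact hm' ▸ hPi
      · exact d m' h1' (by omega)

-- ---------- the shared result specification ----------

-- v is Python's nextDominant value for index i: the first j > i with a strictly larger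
-- prime score, n if there is none
def PvFBex (ps : List Int) (i v : Int) : Prop :=
  i < v ∧ v < (ps.length : Int) ∧ PySem.List.pyGetD ps i 0 < PySem.List.pyGetD ps v 0 ∧
    ∀ m, i < m → m < v → PySem.List.pyGetD ps m 0 ≤ PySem.List.pyGetD ps i 0

def PvFB (ps : List Int) (i v : Int) : Prop :=
  (v = (ps.length : Int) ∧
    ∀ m, i < m → m < (ps.length : Int) → PySem.List.pyGetD ps m 0 ≤ PySem.List.pyGetD ps i 0) ∨
  PvFBex ps i v

-- v is Python's lastDominant value for index i: the last j < i with a ≥ prime score, else -1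
def PvPM (ps : List Int) (i v : Int) : Prop :=
  (v = -1 ∧ ∀ m, 0 ≤ m → m < i → PySem.List.pyGetD ps m 0 < PySem.List.pyGetD ps i 0) ∨
  (0 ≤ v ∧ v < i ∧ PySem.List.pyGetD ps i 0 ≤ PySem.List.pyGetD ps v 0 ∧
    ∀ m, v < m → m < i → PySem.List.pyGetD ps m 0 < PySem.List.pyGetD ps i 0)

theorem pv_FB_unique {ps : List Int} {i v1 v2 : Int}
    (h1 : PvFB ps i v1) (h2 : PvFB ps i v2) : v1 = v2 := by
  rcases h1 with ⟨e1, w1⟩ | ⟨l1, n1, g1, w1⟩ <;> rcases h2 with ⟨e2, w2⟩ | ⟨l2, n2, g2, w2⟩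
  · omega
  · exact absurd (w1 v2 l2 n2) (by omega)
  · exact absurd (w2 v1 l1 n1) (by omega)
  · rcases lt_trichotomy v1 v2 with h | h | h
    · exact absurd (w2 v1 l1 h) (by omega)
    · exact h
    · exact absurd (w1 v2 l2 h) (by omega)

theorem pv_PM_unique {ps : List Int} {i v1 v2 : Int}
    (h1 : PvPM ps i v1) (h2 : PvPM ps i v2) : v1 = v2 := by
  rcases h1 with ⟨e1, w1⟩ | ⟨p1, l1, g1, w1⟩ <;> rcases h2 with ⟨e2, w2⟩ | ⟨p2, l2, g2, w2⟩
  · omega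
  · exact absurd (w1 v2 p2 l2) (by omega)
  · exact absurd (w2 v1 p1 l1) (by omega)
  · rcases lt_trichotomy v1 v2 with h | h | h
    · exact absurd (w1 v2 h l2) (by omega)
    · exact h
    · exact absurd (w2 v1 h l1) (by omega)

-- ---------- A's monotonic-stack loop meets the specification ----------

def pvIR (i : Nat) : List Int := (List.range i).map (fun (m : Nat) => (m : Int))

theorem pvIR_succ (i : Nat) : pvIR (i + 1) = pvIR i ++ [(i : Int)] := by
  rw [pvIR, List.range_succ, List.map_append]; rfl

theorem pv_pyRange_eq (N : Nat) : PySem.List.pyRange 0 (N : Int) 1 = pvIR N := by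
  rw [PySem.List.pyRange_one]
  simp [pvIR]

def pvAfold (ps : List Int) (i : Nat) : (List Int × List Int) × List Int :=
  (pvIR i).foldl (pvStepA ps)
    ((List.replicate ps.length (ps.length : Int), List.replicate ps.length (-1)), [])

-- what A's pop loop does: result stack = the kept suffix, next := i on every popped index
theorem pv_popA_char (ps : List Int) (i : Int) (hi : i ≤ (ps.length : Int)) :
    ∀ (st next : List Int),
      st.Pairwise (· > ·) →
      (∀ j ∈ st, 0 ≤ j ∧ j < i) →
      (∀ j ∈ st, ∀ m : Int, j < m → m < i →
        PySem.List.pyGetD ps m 0 ≤ PySem.List.pyGetD ps j 0) →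
      next.length = ps.length →
      ( (∀ j : Int, (j ∈ (pvPopA ps i next st).2 ↔
            j ∈ st ∧ PySem.List.pyGetD ps i 0 ≤ PySem.List.pyGetD ps j 0)) ∧
        (pvPopA ps i next st).2.Pairwise (· > ·) ∧
        (pvPopA ps i next st).1.length = ps.length ∧
        (∀ j : Int, 0 ≤ j →
          PySem.List.pyGetD (pvPopA ps i next st).1 j 0 =
            if j ∈ st ∧ PySem.List.pyGetD ps j 0 < PySem.List.pyGetD ps i 0 then i
            else PySem.List.pyGetD next j 0) ) := by
  intro st
  induction st with
  | nil =>
    intro next _ _ _ hlen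
    refine ⟨by simp [pvPopA], by simp [pvPopA], by simpa [pvPopA] using hlen, ?_⟩
    intro j _
    simp [pvPopA]
  | cons j0 rest ih =>
    intro next hpw hbnd hwin hlen
    have hj0 := hbnd j0 List.mem_cons_self
    have hj0r : j0 ∉ rest := by
      intro hmem
      exact absurd (List.rel_of_pairwise_cons hpw hmem) (lt_irrefl j0)
    simp only [pvPopA]
    by_cases hc : PySem.List.pyGetD ps j0 0 < PySem.List.pyGetD ps i 0
    · rw [if_pos hc]
      obtain ⟨ih1, ih2, ih3, ih4⟩ := ih (PySem.List.pySetD next j0 i)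
        (List.Pairwise.of_cons hpw)
        (fun j hj => hbnd j (List.mem_cons_of_mem _ hj))
        (fun j hj => hwin j (List.mem_cons_of_mem _ hj))
        (by rw [PySem.List.length_pySetD]; exact hlen)
      refine ⟨?_, ih2, ih3, ?_⟩
      · intro j
        rw [ih1 j, List.mem_cons]
        constructor
        · rintro ⟨hr, hg⟩; exact ⟨Or.inr hr, hg⟩
        · rintro ⟨(rfl | hr), hg⟩
          · exact absurd hg (by omega)
          · exact ⟨hr, hg⟩
      · intro j hj
        rw [ih4 j hj]
        have hlt : j0 < (next.length : Int) := by rw [hlen]; omega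
        by_cases hjj0 : j = j0
        · subst hjj0
          rw [if_neg (fun h => hj0r h.1), pv_gset next j j i hj0.1 hj hlt, if_pos rfl,
            if_pos ⟨List.mem_cons_self, hc⟩]
        · rw [pv_gset next j0 j i hj0.1 hj hlt, if_neg hjj0]
          simp only [List.mem_cons, hjj0, false_or]
    · rw [if_neg hc]
      have hge : ∀ j ∈ j0 :: rest, PySem.List.pyGetD ps i 0 ≤ PySem.List.pyGetD ps j 0 := by
        intro j hj
        rcases List.mem_cons.mp hj with rfl | hj
        · omega
        · have h1 : j < j0 := List.rel_of_pairwise_cons hpw hj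
          have h2 := hwin j (List.mem_cons_of_mem _ hj) j0 h1 hj0.2
          omega
      refine ⟨?_, hpw, hlen, ?_⟩
      · intro j
        constructor
        · intro hj; exact ⟨hj, hge j hj⟩
        · intro hj; exact hj.1
      · intro j _
        rw [if_neg]
        rintro ⟨hjm, hjlt⟩
        exact absurd (hge j hjm) (by omega)

structure PvInvA (ps next last st : List Int) (i : Nat) : Prop where
  ln : next.length = ps.length
  ll : last.length = ps.length
  sorted : st.Pairwise (· > ·)
  bnd : ∀ j ∈ st, 0 ≤ j ∧ j < (i : Int)
  schar : ∀ j : Int, 0 ≤ j → j < (i : Int) →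
    (j ∈ st ↔ ∀ m : Int, j < m → m < (i : Int) →
      PySem.List.pyGetD ps m 0 ≤ PySem.List.pyGetD ps j 0)
  nvalS : ∀ j ∈ st, PySem.List.pyGetD next j 0 = (ps.length : Int)
  nvalP : ∀ j : Int, 0 ≤ j → j < (i : Int) → j ∉ st →
    PvFBex ps j (PySem.List.pyGetD next j 0)
  nUnt : ∀ m : Int, (i : Int) ≤ m → m < (ps.length : Int) →
    PySem.List.pyGetD next m 0 = (ps.length : Int)
  lval : ∀ j : Int, 0 ≤ j → j < (i : Int) → PvPM ps j (PySem.List.pyGetD last j 0)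
  lUnt : ∀ m : Int, (i : Int) ≤ m → m < (ps.length : Int) →
    PySem.List.pyGetD last m 0 = -1

theorem pv_roundsA (ps : List Int) :
    ∀ i : Nat, i ≤ ps.length →
      PvInvA ps (pvAfold ps i).1.1 (pvAfold ps i).1.2 (pvAfold ps i).2 i := by
  intro i
  induction i with
  | zero =>
    intro _
    have h0 : pvAfold ps 0 =
        ((List.replicate ps.length (ps.length : Int), List.replicate ps.length (-1)), []) := by
      simp [pvAfold, pvIR]
    rw [h0]
    refine ⟨List.length_replicate, List.length_replicate, List.Pairwise.nil,
      ?_, ?_, ?_, ?_, ?_, ?_, ?_⟩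
    · intro j hj; cases hj
    · intro j h1 h2; exact absurd h2 (by omega)
    · intro j hj; cases hj
    · intro j h1 h2; exact absurd h2 (by omega)
    · intro m h1 h2; exact pv_get_replicate _ _ _ (by omega) h2
    · intro j h1 h2; exact absurd h2 (by omega)
    · intro m h1 h2; exact pv_get_replicate _ _ _ (by omega) h2
  | succ i ih =>
    intro hi1
    have hiN : i < ps.length := by omega
    have inv := ih (by omega)
    have hwin : ∀ j ∈ (pvAfold ps i).2, ∀ m : Int, j < m → m < (i : Int) →
        PySem.List.pyGetD ps m 0 ≤ PySem.List.pyGetD ps j 0 :=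
      fun j hj => (inv.schar j (inv.bnd j hj).1 (inv.bnd j hj).2).mp hj
    obtain ⟨c1, c2, c3, c4⟩ := pv_popA_char ps (i : Int) (by exact_mod_cast hiN.le)
      (pvAfold ps i).2 (pvAfold ps i).1.1 inv.sorted inv.bnd hwin inv.ln
    have hstep : pvAfold ps (i + 1) =
        ((  (pvPopA ps (i : Int) (pvAfold ps i).1.1 (pvAfold ps i).2).1,
            match (pvPopA ps (i : Int) (pvAfold ps i).1.1 (pvAfold ps i).2).2 with
            | [] => (pvAfold ps i).1.2
            | t :: _ => PySem.List.pySetD (pvAfold ps i).1.2 (i : Int) t),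
         (i : Int) :: (pvPopA ps (i : Int) (pvAfold ps i).1.1 (pvAfold ps i).2).2) := by
      rw [pvAfold, pvIR_succ, List.foldl_append]
      rfl
    rw [hstep]
    set r := pvPopA ps (i : Int) (pvAfold ps i).1.1 (pvAfold ps i).2 with hrdef
    have hbnd2 : ∀ j ∈ r.2, 0 ≤ j ∧ j < (i : Int) :=
      fun j hj => inv.bnd j ((c1 j).mp hj).1
    have hinot : (i : Int) ∉ (pvAfold ps i).2 :=
      fun h => absurd (inv.bnd _ h).2 (lt_irrefl _)
    have hiL : (i : Int) < (ps.length : Int) := by omega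
    refine ⟨c3, ?_, ?_, ?_, ?_, ?_, ?_, ?_, ?_, ?_⟩
    · -- ll
      show (match r.2 with
            | [] => (pvAfold ps i).1.2
            | t :: _ => PySem.List.pySetD (pvAfold ps i).1.2 (i : Int) t).length = ps.length
      rcases hr2 : r.2 with _ | ⟨t, tl⟩
      · exact inv.ll
      · rw [PySem.List.length_pySetD]; exact inv.ll
    · -- sorted
      exact List.pairwise_cons.mpr ⟨fun x hx => (hbnd2 x hx).2, c2⟩
    · -- bnd
      intro j hj
      rcases List.mem_cons.mp hj with rfl | hj
      · constructor <;> omega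
      · have := hbnd2 j hj
        constructor
        · exact this.1
        · omega
    · -- schar
      intro j hj0 hji1
      by_cases hji : j = (i : Int)
      · subst hji
        constructor
        · intro _ m hm1 hm2
          exact absurd hm2 (by omega)
        · intro _
          exact List.mem_cons_self
      · have hjlt : j < (i : Int) := by omega
        constructor
        · intro hmem'
          rcases List.mem_cons.mp hmem' with h | hmem
          · exact absurd h hji
          · obtain ⟨hA2, hge⟩ := (c1 j).mp hmem
            have hwj := (inv.schar j hj0 hjlt).mp hA2
            intro m hm1 hm2
            by_cases hmi : m = (i : Int)
            · exact hmi ▸ hge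
            · exact hwj m hm1 (by omega)
        · intro hw
          have hA2 : j ∈ (pvAfold ps i).2 :=
            (inv.schar j hj0 hjlt).mpr (fun m hm1 hm2 => hw m hm1 (by omega))
          have hge : PySem.List.pyGetD ps (i : Int) 0 ≤ PySem.List.pyGetD ps j 0 :=
            hw (i : Int) hjlt (by omega)
          exact List.mem_cons_of_mem _ ((c1 j).mpr ⟨hA2, hge⟩)
    · -- nvalS
      intro j hj
      rcases List.mem_cons.mp hj with rfl | hj
      · rw [c4 (i : Int) (by omega), if_neg (fun h => hinot h.1)]
        exact inv.nUnt (i : Int) le_rfl hiL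
      · rw [c4 j (hbnd2 j hj).1, if_neg (fun h => absurd ((c1 j).mp hj).2 (by omega))]
        exact inv.nvalS j ((c1 j).mp hj).1
    · -- nvalP
      intro j hj0 hji1 hnot
      have hjne : j ≠ (i : Int) := fun h => hnot (h ▸ List.mem_cons_self)
      have hjlt : j < (i : Int) := by omega
      have hnr : j ∉ r.2 := fun h => hnot (List.mem_cons_of_mem _ h)
      rw [c4 j hj0]
      by_cases hA2 : j ∈ (pvAfold ps i).2
      · have hlt : PySem.List.pyGetD ps j 0 < PySem.List.pyGetD ps (i : Int) 0 := by
          by_contra hge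
          exact hnr ((c1 j).mpr ⟨hA2, by omega⟩)
        rw [if_pos ⟨hA2, hlt⟩]
        exact ⟨hjlt, hiL, hlt, (inv.schar j hj0 hjlt).mp hA2⟩
      · rw [if_neg (fun h => hA2 h.1)]
        exact inv.nvalP j hj0 hjlt hA2
    · -- nUnt
      intro m hm1 hm2
      rw [c4 m (by omega), if_neg (fun h => absurd (inv.bnd m h.1).2 (by omega))]
      exact inv.nUnt m (by omega) hm2
    · -- lval
      intro j hj0 hji1
      show PvPM ps j (PySem.List.pyGetD
        (match r.2 with
         | [] => (pvAfold ps i).1.2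
         | t :: _ => PySem.List.pySetD (pvAfold ps i).1.2 (i : Int) t) j 0)
      by_cases hji : j = (i : Int)
      · subst hji
        rcases hr2 : r.2 with _ | ⟨t, tl⟩
        · -- empty stack after pops: no m < i has score ≥ score i
          rw [inv.lUnt (i : Int) le_rfl hiL]
          left
          refine ⟨rfl, ?_⟩
          intro m hm0 hmi
          by_contra hge
          have hex : ∃ mx : Int, 0 ≤ mx ∧ mx < (i : Int) ∧
              (PySem.List.pyGetD ps (i : Int) 0 ≤ PySem.List.pyGetD ps mx 0) ∧
              ∀ m', mx < m' → m' < (i : Int) →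
                ¬ PySem.List.pyGetD ps (i : Int) 0 ≤ PySem.List.pyGetD ps m' 0 :=
            pv_exists_max _ i ⟨m, hm0, hmi, by omega⟩
          obtain ⟨mx, a, b, c, d⟩ := hex
          have hmxA : mx ∈ (pvAfold ps i).2 :=
            (inv.schar mx a b).mpr (fun m' h1 h2 => by
              have := d m' h1 h2
              omega)
          have : mx ∈ r.2 := (c1 mx).mpr ⟨hmxA, c⟩
          rw [hr2] at this
          cases this
        · -- stack top t is the last index with score ≥ score i
          have htr : t ∈ r.2 := by rw [hr2]; exact List.mem_cons_self
          have htb := hbnd2 t htr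
          have htge := ((c1 t).mp htr).2
          rw [pv_gset _ _ _ _ (by omega) (by omega) (by rw [inv.ll]; omega), if_pos rfl]
          right
          refine ⟨htb.1, htb.2, htge, ?_⟩
          intro m hm1 hm2
          by_contra hge
          have hex : ∃ mx : Int, 0 ≤ mx ∧ mx < (i : Int) ∧
              (t < mx ∧ PySem.List.pyGetD ps (i : Int) 0 ≤ PySem.List.pyGetD ps mx 0) ∧
              ∀ m', mx < m' → m' < (i : Int) →
                ¬ (t < m' ∧ PySem.List.pyGetD ps (i : Int) 0 ≤ PySem.List.pyGetD ps m' 0) :=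
            pv_exists_max _ i ⟨m, by omega, hm2, by omega⟩
          obtain ⟨mx, a, b, ⟨c5, c6⟩, d⟩ := hex
          have hmxA : mx ∈ (pvAfold ps i).2 :=
            (inv.schar mx a b).mpr (fun m' h1 h2 => by
              have := d m' h1 h2
              have : ¬ PySem.List.pyGetD ps (i : Int) 0 ≤ PySem.List.pyGetD ps m' 0 := by
                intro hc; exact (d m' h1 h2) ⟨by omega, hc⟩
              omega)
          have hmxr : mx ∈ r.2 := (c1 mx).mpr ⟨hmxA, c6⟩
          rw [hr2] at hmxr
          rcases List.mem_cons.mp hmxr with rfl | hmxtl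
          · exact absurd c5 (lt_irrefl _)
          · exact absurd (List.rel_of_pairwise_cons (hr2 ▸ c2) hmxtl) (by omega)
      · have hjlt : j < (i : Int) := by omega
        rcases hr2 : r.2 with _ | ⟨t, tl⟩
        · exact inv.lval j hj0 hjlt
        · rw [pv_gset _ _ _ _ (by omega) hj0 (by rw [inv.ll]; omega), if_neg hji]
          exact inv.lval j hj0 hjlt
    · -- lUnt
      intro m hm1 hm2
      show PySem.List.pyGetD
        (match r.2 with
         | [] => (pvAfold ps i).1.2
         | t :: _ => PySem.List.pySetD (pvAfold ps i).1.2 (i : Int) t) m 0 = -1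
      rcases hr2 : r.2 with _ | ⟨t, tl⟩
      · exact inv.lUnt m (by omega) hm2
      · rw [pv_gset _ _ _ _ (by omega) (by omega) (by rw [inv.ll]; omega),
          if_neg (by omega)]
        exact inv.lUnt m (by omega) hm2

theorem pv_A_final (ps : List Int) (j : Int) (h0 : 0 ≤ j) (hj : j < (ps.length : Int)) :
    PvFB ps j (PySem.List.pyGetD (pvAfold ps ps.length).1.1 j 0) ∧
    PvPM ps j (PySem.List.pyGetD (pvAfold ps ps.length).1.2 j 0) := by
  have inv := pv_roundsA ps ps.length le_rfl
  refine ⟨?_, inv.lval j h0 hj⟩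
  by_cases hmem : j ∈ (pvAfold ps ps.length).2
  · left
    exact ⟨inv.nvalS j hmem, (inv.schar j h0 hj).mp hmem⟩
  · right
    exact inv.nvalP j h0 hj hmem

-- ---------- B's pointer-jumping passes meet the same specification ----------

theorem pv_jumpN_spec (ps nxt : List Int) (i : Int) (h0 : 0 ≤ i) (hiL : i < (ps.length : Int)) :
    ∀ (fuel : Nat) (j : Int), ((ps.length : Int) - j).toNat ≤ fuel → i < j →
      j ≤ (ps.length : Int) →
      (∀ m, i < m → m < j → PySem.List.pyGetD ps m 0 ≤ PySem.List.pyGetD ps i 0) →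
      (∀ m, j ≤ m → m < (ps.length : Int) → PvFB ps m (PySem.List.pyGetD nxt m 0)) →
      PvFB ps i (pvJumpNxt ps nxt (ps.length : Int) (PySem.List.pyGetD ps i 0) fuel j) := by
  intro fuel
  induction fuel with
  | zero =>
    intro j hf hij hjL hw _
    have hjeq : j = (ps.length : Int) := by omega
    simp only [pvJumpNxt]
    exact Or.inl ⟨hjeq, fun m hm1 hm2 => hw m hm1 (by omega)⟩
  | succ fuel ih =>
    intro j hf hij hjL hw ht
    simp only [pvJumpNxt]
    by_cases hg : j < (ps.length : Int) ∧ PySem.List.pyGetD ps j 0 ≤ PySem.List.pyGetD ps i 0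
    · rw [if_pos hg]
      rcases ht j le_rfl hg.1 with ⟨hv, hwv⟩ | ⟨hlt, hvL, hgt, hwv⟩
      · rw [hv, max_eq_left (by omega)]
        apply ih
        · omega
        · omega
        · exact le_rfl
        · intro m hm1 hm2
          rcases lt_trichotomy m j with h | rfl | h
          · exact hw m hm1 h
          · exact hg.2
          · exact le_trans (hwv m h hm2) hg.2
        · intro m hm1 hm2; omega
      · rw [max_eq_left (by omega)]
        apply ih
        · omega
        · omega
        · omega
        · intro m hm1 hm2
          rcases lt_trichotomy m j with h | rfl | h
          · exact hw m hm1 h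
          · exact hg.2
          · exact le_trans (hwv m h hm2) hg.2
        · intro m hm1 hm2
          exact ht m (by omega) hm2
    · rw [if_neg hg]
      by_cases hjlt : j < (ps.length : Int)
      · exact Or.inr ⟨hij, hjlt, lt_of_not_ge (fun hle => hg ⟨hjlt, hle⟩), hw⟩
      · have hjeq : j = (ps.length : Int) := by omega
        exact Or.inl ⟨hjeq, fun m hm1 hm2 => hw m hm1 (by omega)⟩

theorem pv_jumpP_spec (ps prv : List Int) (i : Int) (h0 : 0 ≤ i) :
    ∀ (fuel : Nat) (j : Int), (j + 1).toNat ≤ fuel → -1 ≤ j → j < i →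
      (∀ m, j < m → m < i → PySem.List.pyGetD ps m 0 < PySem.List.pyGetD ps i 0) →
      (∀ m, 0 ≤ m → m ≤ j → PvPM ps m (PySem.List.pyGetD prv m 0)) →
      PvPM ps i (pvJumpPrv ps prv (PySem.List.pyGetD ps i 0) fuel j) := by
  intro fuel
  induction fuel with
  | zero =>
    intro j hf hj1 hji hw _
    have hjeq : j = -1 := by omega
    simp only [pvJumpPrv]
    exact Or.inl ⟨hjeq, fun m hm1 hm2 => hw m (by omega) hm2⟩
  | succ fuel ih =>
    intro j hf hj1 hji hw ht
    simp only [pvJumpPrv]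
    by_cases hg : 0 ≤ j ∧ PySem.List.pyGetD ps j 0 < PySem.List.pyGetD ps i 0
    · rw [if_pos hg]
      rcases ht j hg.1 le_rfl with ⟨hv, hwv⟩ | ⟨hp, hvj, hgv, hwv⟩
      · rw [hv, min_eq_left (by omega)]
        apply ih
        · omega
        · omega
        · omega
        · intro m hm1 hm2
          rcases lt_trichotomy m j with h | rfl | h
          · exact lt_trans (hwv m (by omega) h) hg.2
          · exact hg.2
          · exact hw m h hm2
        · intro m hm1 hm2; omega
      · rw [min_eq_left (by omega)]
        apply ih
        · omega
        · omega
        · omega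
        · intro m hm1 hm2
          rcases lt_trichotomy m j with h | rfl | h
          · exact lt_trans (hwv m hm1 h) hg.2
          · exact hg.2
          · exact hw m h hm2
        · intro m hm1 hm2
          exact ht m hm1 (by omega)
    · rw [if_neg hg]
      by_cases hj0 : 0 ≤ j
      · exact Or.inr ⟨hj0, hji, not_lt.mp (fun hlt => hg ⟨hj0, hlt⟩), hw⟩
      · have hjeq : j = -1 := by omega
        exact Or.inl ⟨hjeq, fun m hm1 hm2 => hw m (by omega) hm2⟩

def pvNfold (ps : List Int) (c : Nat) : List Int :=
  ((List.range c).map (fun (k : Nat) => ((ps.length : Int) - 1 - (k : Int)))).foldl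
    (fun a i => PySem.List.pySetD a i
      (pvJumpNxt ps a (ps.length : Int) (PySem.List.pyGetD ps i 0)
        (((ps.length : Int) - (i + 1)).toNat) (i + 1)))
    (List.replicate ps.length (ps.length : Int))

def pvPfold (ps : List Int) (c : Nat) : List Int :=
  (pvIR c).foldl
    (fun a i => PySem.List.pySetD a i
      (pvJumpPrv ps a (PySem.List.pyGetD ps i 0) i.toNat (i - 1)))
    (List.replicate ps.length (-1))

theorem pv_B_nxt (ps : List Int) :
    ∀ c : Nat, c ≤ ps.length →
      (pvNfold ps c).length = ps.length ∧
      ∀ j : Int, (ps.length : Int) - (c : Int) ≤ j → j < (ps.length : Int) →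
        PvFB ps j (PySem.List.pyGetD (pvNfold ps c) j 0) := by
  intro c
  induction c with
  | zero =>
    intro _
    refine ⟨by simp [pvNfold], ?_⟩
    intro j h1 h2
    exact absurd h1 (by omega)
  | succ c ih =>
    intro hc
    obtain ⟨ihl, ihv⟩ := ih (by omega)
    have hstep : pvNfold ps (c + 1) =
        PySem.List.pySetD (pvNfold ps c) ((ps.length : Int) - 1 - (c : Int))
          (pvJumpNxt ps (pvNfold ps c) (ps.length : Int)
            (PySem.List.pyGetD ps ((ps.length : Int) - 1 - (c : Int)) 0)
            (((ps.length : Int) - (((ps.length : Int) - 1 - (c : Int)) + 1)).toNat)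
            (((ps.length : Int) - 1 - (c : Int)) + 1)) := by
      rw [pvNfold, List.range_succ, List.map_append, List.foldl_append]
      rfl
    have h0i : (0 : Int) ≤ (ps.length : Int) - 1 - (c : Int) := by omega
    have hiL : (ps.length : Int) - 1 - (c : Int) < (ps.length : Int) := by omega
    have hFB : PvFB ps ((ps.length : Int) - 1 - (c : Int))
        (pvJumpNxt ps (pvNfold ps c) (ps.length : Int)
          (PySem.List.pyGetD ps ((ps.length : Int) - 1 - (c : Int)) 0)
          (((ps.length : Int) - (((ps.length : Int) - 1 - (c : Int)) + 1)).toNat)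
          (((ps.length : Int) - 1 - (c : Int)) + 1)) := by
      apply pv_jumpN_spec ps (pvNfold ps c) _ h0i hiL
      · exact le_rfl
      · omega
      · omega
      · intro m hm1 hm2
        exact absurd hm2 (by omega)
      · intro m hm1 hm2
        exact ihv m (by omega) hm2
    constructor
    · rw [hstep, PySem.List.length_pySetD]
      exact ihl
    · intro j h1 h2
      rw [hstep, pv_gset _ _ _ _ h0i (by omega) (by rw [ihl]; omega)]
      by_cases hj : j = (ps.length : Int) - 1 - (c : Int)
      · rw [if_pos hj, hj]
        exact hFB
      · rw [if_neg hj]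
        exact ihv j (by omega) h2

theorem pv_B_prv (ps : List Int) :
    ∀ c : Nat, c ≤ ps.length →
      (pvPfold ps c).length = ps.length ∧
      ∀ j : Int, 0 ≤ j → j < (c : Int) →
        PvPM ps j (PySem.List.pyGetD (pvPfold ps c) j 0) := by
  intro c
  induction c with
  | zero =>
    intro _
    refine ⟨by simp [pvPfold, pvIR], ?_⟩
    intro j h1 h2
    exact absurd h2 (by omega)
  | succ c ih =>
    intro hc
    obtain ⟨ihl, ihv⟩ := ih (by omega)
    have hstep : pvPfold ps (c + 1) =
        PySem.List.pySetD (pvPfold ps c) (c : Int)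
          (pvJumpPrv ps (pvPfold ps c) (PySem.List.pyGetD ps (c : Int) 0)
            ((c : Int)).toNat ((c : Int) - 1)) := by
      rw [pvPfold, pvIR_succ, List.foldl_append]
      rfl
    have h0i : (0 : Int) ≤ (c : Int) := by omega
    have hPM : PvPM ps (c : Int)
        (pvJumpPrv ps (pvPfold ps c) (PySem.List.pyGetD ps (c : Int) 0)
          ((c : Int)).toNat ((c : Int) - 1)) := by
      apply pv_jumpP_spec ps (pvPfold ps c) _ h0i
      · omega
      · omega
      · omega
      · intro m hm1 hm2
        exact absurd hm2 (by omega)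
      · intro m hm1 hm2
        exact ihv m hm1 (by omega)
    constructor
    · rw [hstep, PySem.List.length_pySetD]
      exact ihl
    · intro j h1 h2
      rw [hstep, pv_gset _ _ _ _ h0i h1 (by rw [ihl]; omega)]
      by_cases hj : j = (c : Int)
      · rw [if_pos hj, hj]
        exact hPM
      · rw [if_neg hj]
        exact ihv j h1 (by omega)

theorem pv_range_down (N : Nat) :
    PySem.List.pyRange ((N : Int) - 1) (-1) (-1) =
      (List.range N).map (fun (k : Nat) => ((N : Int) - 1 - (k : Int))) := by
  rw [PySem.List.pyRange_neg_one]
  have h : ((N : Int) - 1 - (-1)).toNat = N := by omega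
  rw [h]


-- ---------- A's modular exponentiation is pow(b, e, mod) ----------

-- (a % n) ^ k % n = a ^ k % n
theorem pv_pow_emod (a n : Int) (k : Nat) : (a % n) ^ k % n = a ^ k % n := by
  induction k with
  | zero => simp
  | succ m ihm =>
    rw [pow_succ, pow_succ, Int.mul_emod, ihm, Int.emod_emod_of_dvd _ (dvd_refl _),
      ← Int.mul_emod]

theorem pv_modexp_go (n : Nat) :
    ∀ b a : Int, 0 < n → pvModExpGo b (n : Int) a = PySem.Int.mod (a * b ^ n) pvMod := by
  induction n using Nat.strong_induction_on with
  | _ n ih =>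
    intro b a hn
    have hM : (0 : Int) < pvMod := by norm_num [pvMod]
    rw [pvModExpGo, dif_pos (show (0 : Int) < (n : Int) by exact_mod_cast hn)]
    have hfd : PySem.Int.floordiv (n : Int) 2 = ((n / 2 : Nat) : Int) := by
      exact_mod_cast PySem.Int.floordiv_natCast n 2
    have hmd : PySem.Int.mod (n : Int) 2 = ((n % 2 : Nat) : Int) := by
      exact_mod_cast PySem.Int.mod_natCast n 2
    rw [hfd, hmd]
    by_cases h1 : n = 1
    · subst h1
      rw [show ((1 / 2 : Nat) : Int) = 0 by norm_num, show ((1 % 2 : Nat) : Int) = 1 by norm_num,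
        if_pos (by norm_num), pvModExpGo, dif_neg (by norm_num),
        PySem.Int.mod_eq_emod_of_pos hM, PySem.Int.mod_eq_emod_of_pos hM, pow_one]
    · have hn2 : 0 < n / 2 := by omega
      rcases Nat.even_or_odd n with he | ho
      · have hmod0 : n % 2 = 0 := Nat.even_iff.mp he
        rw [hmod0, if_neg (by norm_num), ih (n / 2) (by omega) _ _ hn2,
          PySem.Int.mod_eq_emod_of_pos hM, PySem.Int.mod_eq_emod_of_pos hM,
          PySem.Int.mod_eq_emod_of_pos hM, Int.mul_emod a, pv_pow_emod, ← Int.mul_emod]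
        have h2 : 2 * (n / 2) = n := by omega
        rw [show (b * b) ^ (n / 2) = b ^ (2 * (n / 2)) by rw [pow_mul, pow_two], h2]
      · have hmod1 : n % 2 = 1 := Nat.odd_iff.mp ho
        rw [hmod1, if_pos (by norm_num), ih (n / 2) (by omega) _ _ hn2,
          PySem.Int.mod_eq_emod_of_pos hM, PySem.Int.mod_eq_emod_of_pos hM,
          PySem.Int.mod_eq_emod_of_pos hM, PySem.Int.mod_eq_emod_of_pos hM,
          Int.mul_emod, Int.emod_emod_of_dvd _ (dvd_refl _), pv_pow_emod,
          ← Int.mul_emod]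
        have h2 : 2 * (n / 2) + 1 = n := by omega
        rw [show (b * b) ^ (n / 2) = b ^ (2 * (n / 2)) by rw [pow_mul, pow_two],
          show a * b * b ^ (2 * (n / 2)) = a * b ^ (2 * (n / 2) + 1) by rw [pow_succ]; ring, h2]

theorem pv_modexpA_eq (b e : Int) :
    pvModExpA b e = PySem.Int.powMod b e.toNat pvMod := by
  show pvModExpGo b e 1 = _
  by_cases he : 0 < e
  · have : e = ((e.toNat : Nat) : Int) := by omega
    rw [this, pv_modexp_go e.toNat b 1 (by omega), one_mul]
    rfl
  · rw [pvModExpGo, dif_neg he]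
    have : e.toNat = 0 := by omega
    rw [this, PySem.Int.powMod, pow_zero]
    decide

-- ---------- A's heap drain equals B's fold with break ----------

-- a fold whose budget is exhausted changes nothing
theorem pv_greedy_stuck (nums nxt prv : List Int) :
    ∀ (q : List (Int × Int)) (s : Int × Int), s.2 ≤ 0 →
      q.foldl (pvGreedyStepB nums nxt prv) s = s := by
  intro q
  induction q with
  | nil => intro s _; rfl
  | cons p rest ih =>
    intro s hs
    rw [List.foldl_cons, pvGreedyStepB, if_pos hs]
    exact ih s hs

theorem pv_greedy_eq (nums subs nxt prv : List Int) :
    ∀ (q : List (Int × Int)) (k a : Int),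
      (∀ p ∈ q, PySem.List.pyGetD nums p.2 0 = -p.1 ∧
        PySem.List.pyGetD subs p.2 0 =
          (PySem.List.pyGetD nxt p.2 0 - p.2) * (p.2 - PySem.List.pyGetD prv p.2 0)) →
      pvGreedyA subs q k a = (q.foldl (pvGreedyStepB nums nxt prv) (a, k)).1 := by
  intro q
  induction q with
  | nil =>
    intro k a _
    rw [pvGreedyA]
    split <;> rfl
  | cons p rest ih =>
    intro k a hq
    obtain ⟨negnum, i⟩ := p
    by_cases hk : 0 < k
    · rw [pvGreedyA, if_pos hk, List.foldl_cons, pvGreedyStepB, if_neg (by omega)]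
      simp only
      rw [ih _ _ (fun p hp => hq p (List.mem_cons_of_mem _ hp))]
      obtain ⟨hv, hs⟩ := hq (negnum, i) List.mem_cons_self
      simp only at hv hs
      rw [hv, hs, pv_modexpA_eq]
    · rw [pvGreedyA, if_neg hk, List.foldl_cons, pvGreedyStepB, if_pos (by omega)]
      rw [pv_greedy_stuck nums nxt prv rest (a, k) (by omega)]

-- ===== VERDICT =====
theorem maximumScore_leet_spec : Claim_equal_maximumScore_leet := by
  intro nums k _ _
  unfold Spec_maximumScore_leet maximumScore_leet maximumScore_leet_alt
  simp only [PySem.List.len_eq, Int.toNat_natCast]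
  set N := nums.length with hN
  set ps := (PySem.List.pyRange 0 (N : Int) 1).map
    (fun i => pvPrimeScore (PySem.List.pyGetD nums i 0)) with hps
  have hlen : ps.length = N := by
    rw [hps, List.length_map, pv_pyRange_eq, pvIR, List.length_map, List.length_range]
  set queue := PySem.List.sorted2 ((PySem.List.enumerate nums).map (fun p => (-p.2, p.1)))
    Prod.fst Prod.snd with hqueue
  rw [show N = ps.length from hlen.symm]
  have hA : (PySem.List.pyRange 0 (ps.length : Int) 1).foldl (pvStepA ps)
      ((List.replicate ps.length (ps.length : Int), List.replicate ps.length (-1)), []) =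
      pvAfold ps ps.length := by
    rw [pv_pyRange_eq, pvAfold]
  have hB1 : (PySem.List.pyRange ((ps.length : Int) - 1) (-1) (-1)).foldl
      (fun a i => PySem.List.pySetD a i
        (pvJumpNxt ps a (ps.length : Int) (PySem.List.pyGetD ps i 0)
          (((ps.length : Int) - (i + 1)).toNat) (i + 1)))
      (List.replicate ps.length (ps.length : Int)) = pvNfold ps ps.length := by
    rw [pv_range_down, pvNfold]
  have hB2 : (PySem.List.pyRange 0 (ps.length : Int) 1).foldl
      (fun a i => PySem.List.pySetD a i
        (pvJumpPrv ps a (PySem.List.pyGetD ps i 0) i.toNat (i - 1)))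
      (List.replicate ps.length (-1)) = pvPfold ps ps.length := by
    rw [pv_pyRange_eq, pvPfold]
  rw [hA, hB1, hB2]
  apply pv_greedy_eq
  intro p hp
  have hmem : p ∈ (PySem.List.enumerate nums).map (fun p => (-p.2, p.1)) :=
    (PySem.List.sorted2_perm _ _ _ _).mem_iff.mp hp
  obtain ⟨q, hq, rfl⟩ := List.mem_map.mp hmem
  obtain ⟨kk, hkk, rfl⟩ := (PySem.List.mem_enumerate_iff nums 0 q).mp hq
  simp only [zero_add, neg_neg]
  have hkk' : kk < ps.length := by omega
  constructor
  · rw [PySem.List.pyGetD_natCast]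
    exact List.getD_eq_getElem _ _ hkk
  · rw [PySem.List.pyGetD_map_pyRange
      (fun i => (PySem.List.pyGetD (pvAfold ps ps.length).1.1 i 0 - i) *
        (i - PySem.List.pyGetD (pvAfold ps ps.length).1.2 i 0)) ps.length kk 0 hkk']
    have h0 : (0 : Int) ≤ (kk : Int) := by omega
    have h1 : (kk : Int) < (ps.length : Int) := by omega
    obtain ⟨hFA, hPA⟩ := pv_A_final ps (kk : Int) h0 h1
    obtain ⟨_, hFBall⟩ := pv_B_nxt ps ps.length le_rfl
    obtain ⟨_, hPBall⟩ := pv_B_prv ps ps.length le_rfl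
    have e1 : PySem.List.pyGetD (pvAfold ps ps.length).1.1 (kk : Int) 0 =
        PySem.List.pyGetD (pvNfold ps ps.length) (kk : Int) 0 :=
      pv_FB_unique hFA (hFBall (kk : Int) (by omega) h1)
    have e2 : PySem.List.pyGetD (pvAfold ps ps.length).1.2 (kk : Int) 0 =
        PySem.List.pyGetD (pvPfold ps ps.length) (kk : Int) 0 :=
      pv_PM_unique hPA (hPBall (kk : Int) h0 h1)
    rw [e1, e2]
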